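-- pv_equiv track=rewrite | github.com/BrunoHF04/SanitizadorRTF | rtf_sanitize.py | _find_hex_orphan_run_start
-- ===== SOURCE A (Python) =====
-- HEX_ORPHAN_MIN_RUN = 500_000
--
-- def _find_hex_orphan_run_start(text: str, min_run: int = HEX_ORPHAN_MIN_RUN) -> int | None:
--     """
--     Localiza o início do primeiro trecho com >= min_run dígitos hex [0-9A-Fa-f].
--     Espaço, tab e fins de linha entre dígitos são ignorados (pngblip com quebras de linha).
--     """
--     if min_run <= 0 or len(text) < min_run:
--         return None
--     i = 0
--     n = len(text)
--     run_start = 0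
--     run_len = 0
--     hex_set = frozenset("0123456789abcdefABCDEF")
--     ws = frozenset(" \t\r\n\f\v")
--     while i < n:
--         ch = text[i]
--         if ch in hex_set:
--             if run_len == 0:
--                 run_start = i
--             run_len += 1
--             if run_len >= min_run:
--                 return run_start
--             i += 1
--         elif ch in ws:
--             i += 1
--         else:
--             run_len = 0
--             i += 1
--     return None
-- ===== SOURCE B (Python) =====
-- HEX_ORPHAN_MIN_RUN = 500_000
--
-- def _find_hex_orphan_run_start(text: str, min_run: int = HEX_ORPHAN_MIN_RUN) -> int | None:
--     """Segment-based: walk maximal segments of hex-or-whitespace chars; report the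
--     first hex digit of the first segment containing >= min_run hex digits."""
--     if min_run <= 0 or len(text) < min_run:
--         return None
--     hex_set = frozenset("0123456789abcdefABCDEF")
--     allowed = hex_set | frozenset(" \t\r\n\f\v")
--     n = len(text)
--     i = 0
--     while i < n:
--         if text[i] not in allowed:
--             i += 1
--             continue
--         j = i
--         count = 0
--         first_hex = -1
--         while j < n and text[j] in allowed:
--             ch = text[j]
--             if ch in hex_set:
--                 count += 1
--                 if first_hex < 0:
--                     first_hex = j
--             j += 1
--         if count >= min_run:
--             return first_hex
--         i = j
--     return None
-- ===== Notes on version B (the rewrite author's own statement) =====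
-- stated objective: alternative
-- what changed: B decomposes the text into maximal segments of hex-or-whitespace characters and, for each segment in order, counts its hex digits and records its first hex position, returning that position for the first segment with at least min_run hex digits, instead of A's single stateful scan with an online run counter, run-start register and early return.
import Mathlib
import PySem

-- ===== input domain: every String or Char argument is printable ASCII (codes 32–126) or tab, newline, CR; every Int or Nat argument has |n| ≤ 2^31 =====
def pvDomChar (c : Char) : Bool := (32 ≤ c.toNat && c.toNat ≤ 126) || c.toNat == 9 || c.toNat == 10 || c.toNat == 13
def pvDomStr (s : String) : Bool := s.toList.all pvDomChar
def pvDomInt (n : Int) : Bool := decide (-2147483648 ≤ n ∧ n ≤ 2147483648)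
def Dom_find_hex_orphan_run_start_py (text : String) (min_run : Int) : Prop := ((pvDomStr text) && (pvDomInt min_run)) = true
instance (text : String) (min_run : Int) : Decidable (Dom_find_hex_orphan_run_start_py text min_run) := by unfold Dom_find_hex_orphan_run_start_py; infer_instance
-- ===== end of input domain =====

-- B re-implements the scan as a segment decomposition (maximal hex-or-whitespace
-- segments, per-segment hex count + first-hex index) instead of A's online run
-- counter; same O(n) cost, objective: alternative. No mutation of arguments.


-- shared character-class helpers (the frozenset literals both Pythons build)
def isHexC (c : Char) : Bool := "0123456789abcdefABCDEF".toList.contains c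
def isWsC (c : Char) : Bool := " \t\r\n\x0c\x0b".toList.contains c
def allowedC (c : Char) : Bool := isHexC c || isWsC c

-- ===== PORT A =====
-- A's while loop over i with state (run_start, run_len), as structural recursion.
def goA : List Char → Int → Int → Int → Int → Option Int
  | [], _, _, _, _ => none
  | c :: t, i, run_start, run_len, m =>
    if isHexC c then
      let rs := if run_len = 0 then i else run_start
      if m ≤ run_len + 1 then some rs
      else goA t (i + 1) rs (run_len + 1) m
    else if isWsC c then goA t (i + 1) run_start run_len m
    else goA t (i + 1) run_start 0 m

def find_hex_orphan_run_start_py (text : String) (min_run : Int) : Option Int :=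
  if min_run ≤ 0 ∨ (text.toList.length : Int) < min_run then none
  else goA text.toList 0 0 0 min_run

-- ===== PORT B =====
-- B's inner while loop: scan one maximal allowed segment, returning
-- (remaining chars, j, count, first_hex) exactly as Source B's mutable j/count/first_hex.
def scanSeg : List Char → Int → Int → Int → (List Char × Int × Int × Int)
  | [], j, count, first_hex => ([], j, count, first_hex)
  | c :: t, j, count, first_hex =>
    if allowedC c then
      scanSeg t (j + 1) (if isHexC c then count + 1 else count)
        (if isHexC c ∧ first_hex < 0 then j else first_hex)
    else (c :: t, j, count, first_hex)

theorem scanSeg_len_le : ∀ (cs : List Char) (j k f : Int),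
    (scanSeg cs j k f).1.length ≤ cs.length := by
  intro cs
  induction cs with
  | nil => intro j k f; simp [scanSeg]
  | cons c t ih =>
    intro j k f
    simp only [scanSeg]
    split
    · exact le_trans (ih _ _ _) (Nat.le_succ _)
    · simp


theorem scanSeg_cons_allowed {c : Char} {t : List Char} {j k f : Int} (h : allowedC c = true) :
    scanSeg (c :: t) j k f =
      scanSeg t (j + 1) (if isHexC c then k + 1 else k) (if isHexC c ∧ f < 0 then j else f) := by
  simp [scanSeg, h]

-- B's outer while loop.
def goB : List Char → Int → Int → Option Int
  | [], _, _ => none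
  | c :: t, i, m =>
    if allowedC c = false then goB t (i + 1) m
    else
      let r := scanSeg (c :: t) i 0 (-1)
      if m ≤ r.2.2.1 then some r.2.2.2
      else goB r.1 r.2.1 m
termination_by cs _ _ => cs.length
decreasing_by
  · simp
  · rename_i hcond _
    have hc : allowedC c = true := by revert hcond; simp
    rw [scanSeg_cons_allowed hc]
    simpa using Nat.lt_succ_of_le (scanSeg_len_le t _ _ _)

def find_hex_orphan_run_start_py_alt (text : String) (min_run : Int) : Option Int :=
  if min_run ≤ 0 ∨ (text.toList.length : Int) < min_run then none
  else goB text.toList 0 min_run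

-- ===== PRECONDITION & SPEC =====
def Spec_find_hex_orphan_run_start_py (text : String) (min_run : Int) (out : Option Int) : Prop := out = find_hex_orphan_run_start_py_alt text min_run
instance (text : String) (min_run : Int) (out : Option Int) : Decidable (Spec_find_hex_orphan_run_start_py text min_run out) := by unfold Spec_find_hex_orphan_run_start_py; infer_instance

-- ===== CLAIM (what is proved, stated in full; the proofs are below) =====
def Claim_equal_find_hex_orphan_run_start_py : Prop := ∀ (text : String) (min_run : Int), Dom_find_hex_orphan_run_start_py text min_run → Spec_find_hex_orphan_run_start_py text min_run (find_hex_orphan_run_start_py text min_run)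

-- ===== LEMMAS AND PROOFS =====

theorem scanSeg_cons_block {c : Char} {t : List Char} {j k f : Int} (h : allowedC c = false) :
    scanSeg (c :: t) j k f = (c :: t, j, k, f) := by
  simp [scanSeg, h]


-- one-step unfolding lemmas for the two loop bodies
theorem goA_cons_hex {c : Char} {t : List Char} {i rs L m : Int} (h : isHexC c = true) :
    goA (c :: t) i rs L m =
      (if m ≤ L + 1 then some (if L = 0 then i else rs)
       else goA t (i + 1) (if L = 0 then i else rs) (L + 1) m) := by
  simp [goA, h]

theorem goA_cons_ws {c : Char} {t : List Char} {i rs L m : Int}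
    (hx : isHexC c = false) (hw : isWsC c = true) :
    goA (c :: t) i rs L m = goA t (i + 1) rs L m := by
  simp [goA, hx, hw]

theorem goA_cons_other {c : Char} {t : List Char} {i rs L m : Int}
    (hx : isHexC c = false) (hw : isWsC c = false) :
    goA (c :: t) i rs L m = goA t (i + 1) rs 0 m := by
  simp [goA, hx, hw]

theorem goB_cons_allowed {c : Char} {t : List Char} {i m : Int} (h : allowedC c = true) :
    goB (c :: t) i m =
      (if m ≤ (scanSeg (c :: t) i 0 (-1)).2.2.1 then some (scanSeg (c :: t) i 0 (-1)).2.2.2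
       else goB (scanSeg (c :: t) i 0 (-1)).1 (scanSeg (c :: t) i 0 (-1)).2.1 m) := by
  rw [goB]
  simp [h]

theorem goB_cons_block {c : Char} {t : List Char} {i m : Int} (h : allowedC c = false) :
    goB (c :: t) i m = goB t (i + 1) m := by
  rw [goB]
  simp [h]

-- with run_len = 0, goA ignores run_start
theorem goA_rs_irrel : ∀ (cs : List Char) (i rs rs' m : Int),
    goA cs i rs 0 m = goA cs i rs' 0 m := by
  intro cs
  induction cs with
  | nil => intro i rs rs' m; simp [goA]
  | cons c t ih =>
    intro i rs rs' m
    by_cases hx : isHexC c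
    · rw [goA_cons_hex hx, goA_cons_hex hx]
      rw [if_pos (show (0:Int) = 0 from rfl), if_pos (show (0:Int) = 0 from rfl)]
    · by_cases hw : isWsC c
      · rw [goA_cons_ws (by simpa using hx) hw, goA_cons_ws (by simpa using hx) hw]
        exact ih _ _ _ _
      · rw [goA_cons_other (by simpa using hx) (by simpa using hw),
          goA_cons_other (by simpa using hx) (by simpa using hw)]
        exact ih _ _ _ _

theorem scanSeg_cnt_mono : ∀ (cs : List Char) (j k f : Int),
    k ≤ (scanSeg cs j k f).2.2.1 := by
  intro cs
  induction cs with
  | nil => intro j k f; simp [scanSeg]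
  | cons c t ih =>
    intro j k f
    simp only [scanSeg]
    split
    · split
      · exact le_trans (by omega) (ih _ _ _)
      · exact ih _ _ _
    · simp

theorem scanSeg_fh_fix : ∀ (cs : List Char) (j k f : Int), 0 ≤ f →
    (scanSeg cs j k f).2.2.2 = f := by
  intro cs
  induction cs with
  | nil => intro j k f _; simp [scanSeg]
  | cons c t ih =>
    intro j k f hf
    simp only [scanSeg]
    split
    · have : ¬ (isHexC c = true ∧ f < 0) := by rintro ⟨_, h⟩; omega
      rw [if_neg this]
      exact ih _ _ _ hf
    · simp

theorem scanSeg_j_mono : ∀ (cs : List Char) (j k f : Int),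
    j ≤ (scanSeg cs j k f).2.1 := by
  intro cs
  induction cs with
  | nil => intro j k f; simp [scanSeg]
  | cons c t ih =>
    intro j k f
    simp only [scanSeg]
    split
    · exact le_trans (by omega) (ih _ _ _)
    · simp

-- running segment: goA inside a segment with run_len = k ≥ 1, run started at rs
theorem goA_seg_run : ∀ (cs : List Char) (j rs k m : Int), 1 ≤ k → k < m → 0 ≤ rs →
    goA cs j rs k m =
      (if m ≤ (scanSeg cs j k rs).2.2.1 then some rs
       else goA (scanSeg cs j k rs).1 (scanSeg cs j k rs).2.1 0 0 m) := by
  intro cs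
  induction cs with
  | nil =>
    intro j rs k m hk hkm hrs
    simp [goA, scanSeg]
    omega
  | cons c t ih =>
    intro j rs k m hk hkm hrs
    by_cases hx : isHexC c
    · have hal : allowedC c = true := by simp [allowedC, hx]
      rw [scanSeg_cons_allowed hal, if_pos hx,
        if_neg (show ¬ (isHexC c = true ∧ rs < 0) by rintro ⟨_, h⟩; omega)]
      rw [goA_cons_hex hx, if_neg (show ¬ (k = 0) by omega)]
      by_cases hstop : m ≤ k + 1
      · rw [if_pos hstop]
        have h1 : k + 1 ≤ (scanSeg t (j + 1) (k + 1) rs).2.2.1 := scanSeg_cnt_mono _ _ _ _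
        rw [if_pos (by omega)]
      · rw [if_neg hstop]
        exact ih _ _ _ _ (by omega) (by omega) hrs
    · by_cases hw : isWsC c
      · have hal : allowedC c = true := by simp [allowedC, hw]
        rw [scanSeg_cons_allowed hal, if_neg hx,
          if_neg (show ¬ (isHexC c = true ∧ rs < 0) by rintro ⟨h, _⟩; exact hx h)]
        rw [goA_cons_ws (by simpa using hx) hw]
        exact ih _ _ _ _ hk hkm hrs
      · have hal : allowedC c = false := by simp [allowedC, hx, hw]
        rw [scanSeg_cons_block hal]
        rw [if_neg (show ¬ m ≤ k by omega)]
        rw [goA_cons_other (by simpa using hx) (by simpa using hw)]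
        rw [goA_cons_other (by simpa using hx) (by simpa using hw)]
        exact goA_rs_irrel _ _ _ _ _

-- fresh segment: goA with run_len = 0 equals B's per-segment check
theorem goA_seg_fresh : ∀ (cs : List Char) (i rs m : Int), 0 < m → 0 ≤ i →
    goA cs i rs 0 m =
      (if m ≤ (scanSeg cs i 0 (-1)).2.2.1 then some (scanSeg cs i 0 (-1)).2.2.2
       else goA (scanSeg cs i 0 (-1)).1 (scanSeg cs i 0 (-1)).2.1 0 0 m) := by
  intro cs
  induction cs with
  | nil =>
    intro i rs m hm hi
    simp [goA, scanSeg]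
    omega
  | cons c t ih =>
    intro i rs m hm hi
    by_cases hx : isHexC c
    · have hal : allowedC c = true := by simp [allowedC, hx]
      rw [scanSeg_cons_allowed hal, if_pos hx,
        if_pos (show isHexC c = true ∧ (-1 : Int) < 0 from ⟨hx, by omega⟩)]
      rw [goA_cons_hex hx, if_pos (show (0:Int) = 0 from rfl)]
      by_cases hstop : m ≤ 0 + 1
      · rw [if_pos hstop]
        have h1 : (0:Int) + 1 ≤ (scanSeg t (i + 1) (0 + 1) i).2.2.1 := scanSeg_cnt_mono _ _ _ _
        rw [if_pos (by omega), scanSeg_fh_fix _ _ _ _ hi]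
      · rw [if_neg hstop]
        rw [goA_seg_run t (i + 1) i (0 + 1) m (by omega) (by omega) hi]
        rw [scanSeg_fh_fix _ _ _ _ hi]
    · by_cases hw : isWsC c
      · have hal : allowedC c = true := by simp [allowedC, hw]
        rw [scanSeg_cons_allowed hal, if_neg hx,
          if_neg (show ¬ (isHexC c = true ∧ (-1:Int) < 0) by rintro ⟨h, _⟩; exact hx h)]
        rw [goA_cons_ws (by simpa using hx) hw]
        exact ih _ _ _ hm (by omega)
      · have hal : allowedC c = false := by simp [allowedC, hx, hw]
        rw [scanSeg_cons_block hal]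
        rw [if_neg (show ¬ m ≤ (0:Int) by omega)]
        rw [goA_cons_other (by simpa using hx) (by simpa using hw)]
        rw [goA_cons_other (by simpa using hx) (by simpa using hw)]
        exact goA_rs_irrel _ _ _ _ _

-- the two loops agree from any fresh state
theorem goA_eq_goB : ∀ (n : ℕ) (cs : List Char), cs.length ≤ n →
    ∀ (i rs m : Int), 0 < m → 0 ≤ i → goA cs i rs 0 m = goB cs i m := by
  intro n
  induction n with
  | zero =>
    intro cs hcs i rs m hm hi
    have : cs = [] := List.eq_nil_of_length_eq_zero (by omega)
    subst this
    rw [goB]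
    simp [goA]
  | succ n ih =>
    intro cs hcs i rs m hm hi
    match cs with
    | [] =>
      rw [goB]
      simp [goA]
    | c :: t =>
      by_cases hal : allowedC c = true
      · rw [goA_seg_fresh _ _ _ _ hm hi, goB_cons_allowed hal]
        split
        · rfl
        · apply ih
          · have h1 : (scanSeg (c :: t) i 0 (-1)).1.length ≤ t.length := by
              rw [scanSeg_cons_allowed hal]
              exact scanSeg_len_le t _ _ _
            simp at hcs
            omega
          · exact hm
          · exact le_trans hi (scanSeg_j_mono _ _ _ _)
      · have hal' : isHexC c = false ∧ isWsC c = false := by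
          simpa [allowedC] using hal
        rw [goA_cons_other hal'.1 hal'.2, goB_cons_block (by simp [allowedC, hal'.1, hal'.2])]
        exact ih t (by simp at hcs; omega) (i + 1) rs m hm (by omega)

-- ===== VERDICT (by name: the statement is the Claim_ definition above) =====
theorem find_hex_orphan_run_start_py_spec : Claim_equal_find_hex_orphan_run_start_py := by
  intro text min_run _
  unfold Spec_find_hex_orphan_run_start_py
  unfold find_hex_orphan_run_start_py find_hex_orphan_run_start_py_alt
  split
  · rfl
  · rename_i h
    rw [not_or, not_lt] at h
    exact goA_eq_goB text.toList.length text.toList le_rfl 0 0 min_run (by omega) le_rfl
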